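-- pv_equiv track=rewrite | github.com/rtmendes/mngr | scripts/sync_common_ratchets.py | _find_section_end
-- ===== SOURCE A (Python) =====
-- def _find_section_end(lines: list[str], sections: list[tuple[int, str]], section_name: str) -> int | None:
--     """Find the line index where new content should be inserted at the end of a section.
--
--     Returns the line after the last non-blank line of the section, or None if
--     the section does not exist in the file.
--     """
--     section_names = [name for _, name in sections]
--     if section_name not in section_names:
--         return None
--
--     sec_idx = section_names.index(section_name)
--     sec_line = sections[sec_idx][0]
--
--     if sec_idx + 1 < len(sections):
--         boundary = sections[sec_idx + 1][0]
--     else: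
--         boundary = len(lines)
--
--     insert_at = boundary
--     while insert_at > sec_line and lines[insert_at - 1].strip() == "":
--         insert_at -= 1
--     return insert_at
-- ===== SOURCE B (Python) =====
-- def _find_section_end(lines: list[str], sections: list[tuple[int, str]], section_name: str) -> int | None:
--     for idx, (sec_line, name) in enumerate(sections):
--         if name == section_name:
--             boundary = sections[idx + 1][0] if idx + 1 < len(sections) else len(lines)
--             insert_at = sec_line
--             for i in range(sec_line, boundary):
--                 if lines[i].strip() != "":
--                     insert_at = i + 1
--             return insert_at
--     return None
-- ===== Notes on version B (the rewrite author's own statement) =====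
-- stated objective: alternative
-- what changed: The list-of-names + .index lookup is replaced by a single enumerate pass over sections, and the backward while-loop over trailing blanks is replaced by a forward scan of the whole section that tracks the index after the last non-blank line.
-- outside the precondition, e.g. on _find_section_end(['x'], [(5, 'a')], 'a'): A returns 1, B returns 5; on _find_section_end(['a'], [(-5, 's')], 's'): A returns 1, B raises IndexError
import Mathlib
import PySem

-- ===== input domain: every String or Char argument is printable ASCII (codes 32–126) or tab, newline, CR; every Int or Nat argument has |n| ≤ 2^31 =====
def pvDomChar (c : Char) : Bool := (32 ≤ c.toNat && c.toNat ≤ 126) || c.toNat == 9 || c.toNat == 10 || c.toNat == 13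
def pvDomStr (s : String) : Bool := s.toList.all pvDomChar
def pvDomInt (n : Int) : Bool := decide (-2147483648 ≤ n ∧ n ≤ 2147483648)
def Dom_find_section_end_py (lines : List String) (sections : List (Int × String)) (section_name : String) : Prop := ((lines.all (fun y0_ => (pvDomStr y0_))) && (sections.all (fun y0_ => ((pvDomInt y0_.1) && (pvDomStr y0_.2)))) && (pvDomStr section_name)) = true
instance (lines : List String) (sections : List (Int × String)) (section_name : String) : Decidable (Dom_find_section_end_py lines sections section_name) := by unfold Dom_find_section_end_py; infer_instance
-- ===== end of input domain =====

-- B replaces the names-list + .index lookup by one enumerate pass over sections and the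
-- backward trailing-blank while-loop by a forward scan tracking the last non-blank line
-- (alternative decomposition, same cost).


-- ===== PORT A =====
-- the backward while-loop: while insert_at > sec_line and lines[insert_at-1].strip() == "":
-- fuel = (boundary - sec_line).toNat bounds the iterations (insert_at stays > sec_line)
def pvTrimA (lines : List String) (sec_line : Int) : Nat → Int → Int
  | 0, insert_at => insert_at
  | n + 1, insert_at =>
    if sec_line < insert_at ∧ (PySem.List.pyGet? lines (insert_at - 1)).map PySem.Str.strip = some "" then
      pvTrimA lines sec_line n (insert_at - 1)
    else insert_at

def find_section_end_py (lines : List String) (sections : List (Int × String)) (section_name : String) : Option Int :=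
  let section_names := sections.map (·.2)
  if section_names.contains section_name = false then none
  else
    match PySem.List.index? section_names section_name with
    | none => none  -- unreachable: contains succeeded
    | some sec_idx =>
      let sec_line := (sections.getD sec_idx (0, "")).1
      let boundary :=
        if sec_idx + 1 < sections.length then (sections.getD (sec_idx + 1) (0, "")).1
        else (lines.length : Int)
      some (pvTrimA lines sec_line (boundary - sec_line).toNat boundary)

-- ===== PORT B =====
-- forward scan: insert_at = sec_line; for i in range(sec_line, boundary): if lines[i].strip() != "": insert_at = i + 1
def pvScanB (lines : List String) (sec_line boundary : Int) : Int :=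
  (PySem.List.pyRange sec_line boundary 1).foldl
    (fun insert_at i =>
      if (PySem.List.pyGet? lines i).map PySem.Str.strip ≠ some "" then i + 1 else insert_at)
    sec_line

-- the enumerate loop over sections; sections[idx+1] is the head of the remaining tail
def pvFindB (lines : List String) : List (Int × String) → String → Option Int
  | [], _ => none
  | (sec_line, name) :: rest, section_name =>
    if name == section_name then
      let boundary := match rest with
        | [] => (lines.length : Int)
        | (l2, _) :: _ => l2
      some (pvScanB lines sec_line boundary)
    else pvFindB lines rest section_name

def find_section_end_py_alt (lines : List String) (sections : List (Int × String)) (section_name : String) : Option Int :=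
  pvFindB lines sections section_name

-- ===== PRECONDITION & SPEC =====
-- (sec_line, boundary) of the FIRST section matching the name (boundary = next section's line, or the default)
def pvMatched : List (Int × String) → String → Int → Option (Int × Int)
  | [], _, _ => none
  | (l, nm) :: rest, name, dflt =>
    if nm == name then
      some (l, match rest with | [] => dflt | (l2, _) :: _ => l2)
    else pvMatched rest name dflt

def pvOkPair : Option (Int × Int) → Int → Bool
  | none, _ => true
  | some (s, b), n => decide (0 ≤ s) && decide (s ≤ b) && decide (b ≤ n)

-- Pre_ excludes inputs whose matched section has a start line or boundary outside 0..len(lines)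
-- or out of order: there A raises IndexError, or returns an accidental value of the reversed
-- bounds / Python's negative-index wraparound (where natural B may itself raise).
def Pre_find_section_end_py (lines : List String) (sections : List (Int × String)) (section_name : String) : Prop :=
  pvOkPair (pvMatched sections section_name (lines.length : Int)) (lines.length : Int) = true
instance (lines : List String) (sections : List (Int × String)) (section_name : String) : Decidable (Pre_find_section_end_py lines sections section_name) := by unfold Pre_find_section_end_py; infer_instance

def pvWitness_find_section_end_py : List String × (List (Int × String)) × String :=
  (["a", ""], [((0 : Int), "s")], "s")

def Spec_find_section_end_py (lines : List String) (sections : List (Int × String)) (section_name : String) (out : Option Int) : Prop := out = find_section_end_py_alt lines sections section_name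
instance (lines : List String) (sections : List (Int × String)) (section_name : String) (out : Option Int) : Decidable (Spec_find_section_end_py lines sections section_name out) := by unfold Spec_find_section_end_py; infer_instance

-- ===== CLAIM (what is proved, stated in full; the proofs are below) =====
def Claim_equal_find_section_end_py : Prop := ∀ (lines : List String) (sections : List (Int × String)) (section_name : String), Dom_find_section_end_py lines sections section_name → Pre_find_section_end_py lines sections section_name → Spec_find_section_end_py lines sections section_name (find_section_end_py lines sections section_name)

-- ===== LEMMAS AND PROOFS =====

-- the backward trim and the forward scan agree on a well-formed section range
lemma pvTrim_eq_scan (lines : List String) (s : Int) (hs : 0 ≤ s) :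
    ∀ (m : Nat) (b : Int), s ≤ b → b ≤ (lines.length : Int) → (b - s).toNat = m →
      pvTrimA lines s m b = pvScanB lines s b := by
  intro m
  induction m with
  | zero =>
    intro b h1 h2 h3
    have hb : b = s := by omega
    subst hb
    simp [pvTrimA, pvScanB, PySem.List.pyRange_one_eq_nil (le_refl b)]
  | succ n ih =>
    intro b h1 h2 h3
    have hlt : s < b := by omega
    have hsplit : PySem.List.pyRange s b 1 = PySem.List.pyRange s (b - 1) 1 ++ [b - 1] := by
      have h := PySem.List.pyRange_one_succ_right (a := s) (b := b - 1) (by omega)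
      have : b - 1 + 1 = b := by ring
      rw [this] at h
      exact h
    have hscan : pvScanB lines s b =
        (if (PySem.List.pyGet? lines (b - 1)).map PySem.Str.strip ≠ some "" then b - 1 + 1
         else pvScanB lines s (b - 1)) := by
      simp only [pvScanB, hsplit, List.foldl_append, List.foldl_cons, List.foldl_nil]
    by_cases hblank : (PySem.List.pyGet? lines (b - 1)).map PySem.Str.strip = some ""
    · have hstep : pvTrimA lines s (n + 1) b = pvTrimA lines s n (b - 1) := by
        simp [pvTrimA, hlt, hblank]
      rw [hstep, ih (b - 1) (by omega) (by omega) (by omega), hscan]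
      simp [hblank]
    · have hstep : pvTrimA lines s (n + 1) b = b := by
        simp [pvTrimA, hblank]
      rw [hstep, hscan]
      simp [hblank]

lemma pvA_cons_ne (lines : List String) (l : Int) (nm : String) (rest : List (Int × String))
    (section_name : String) (hne : (nm == section_name) = false) :
    find_section_end_py lines ((l, nm) :: rest) section_name =
      find_section_end_py lines rest section_name := by
  have hne' : nm ≠ section_name := by simpa using hne
  have hne2 : (section_name == nm) = false := by simpa using Ne.symm hne'
  simp only [find_section_end_py, List.map_cons, List.contains_cons, hne2, Bool.false_or]
  rw [PySem.List.index?_cons_of_ne (rest.map (·.2)) hne']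
  cases hidx : PySem.List.index? (rest.map (·.2)) section_name with
  | none =>
    simp
  | some k =>
    simp only [Option.map_some]
    by_cases hc : (rest.map (·.2)).contains section_name = false
    · exfalso
      have hmem : section_name ∈ rest.map (·.2) := by
        rw [← PySem.List.index?_isSome_iff, hidx]; rfl
      simp [hmem] at hc
    · simp only [hc]
      have hlen : k + 1 + 1 < rest.length + 1 ↔ k + 1 < rest.length := by omega
      simp [List.length_cons, hlen]

lemma pvAB_eq (lines : List String) (section_name : String) :
    ∀ sections : List (Int × String),
      Pre_find_section_end_py lines sections section_name →
      find_section_end_py lines sections section_name = pvFindB lines sections section_name := by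
  intro sections
  induction sections with
  | nil => intro _; simp [find_section_end_py, pvFindB]
  | cons hd rest ih =>
    obtain ⟨l, nm⟩ := hd
    intro hpre
    by_cases hnm : (nm == section_name) = true
    · have hnm' : nm = section_name := by simpa using hnm
      subst hnm'
      clear ih
      -- evaluate A's lookup on the matching head
      simp only [find_section_end_py, List.map_cons, List.contains_cons, beq_self_eq_true,
        Bool.true_or]
      rw [PySem.List.index?_cons_self]
      simp only [Bool.true_eq_false, if_false, List.getD_cons_zero, List.length_cons]
      cases rest with
      | nil =>
        have hbounds : 0 ≤ l ∧ l ≤ (lines.length : Int) := by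
          simpa [Pre_find_section_end_py, pvMatched, pvOkPair] using hpre
        simp only [pvFindB, beq_self_eq_true, if_true]
        simp only [List.length_nil, Nat.zero_add, Nat.lt_irrefl, if_false]
        exact congrArg some
          (pvTrim_eq_scan lines l hbounds.1 _ _ hbounds.2 (le_refl _) rfl)
      | cons hd2 rest2 =>
        obtain ⟨l2, nm2⟩ := hd2
        have hbounds : (0 ≤ l ∧ l ≤ l2) ∧ l2 ≤ (lines.length : Int) := by
          simpa [Pre_find_section_end_py, pvMatched, pvOkPair] using hpre
        simp only [pvFindB, beq_self_eq_true, if_true]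
        simp only [List.length_cons, List.getD_cons_succ, List.getD_cons_zero]
        have h1 : 0 + 1 < rest2.length + 1 + 1 := by omega
        simp only [h1, if_true]
        exact congrArg some
          (pvTrim_eq_scan lines l hbounds.1.1 _ _ hbounds.1.2 hbounds.2 rfl)
    · have hne : (nm == section_name) = false := by simpa using hnm
      rw [pvA_cons_ne lines l nm rest section_name hne]
      have hpre' : Pre_find_section_end_py lines rest section_name := by
        simpa [Pre_find_section_end_py, pvMatched, hne] using hpre
      rw [ih hpre']
      simp [pvFindB, hne]

-- ===== VERDICT (by name: the statement is the Claim_ definition above) =====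
theorem find_section_end_py_spec : Claim_equal_find_section_end_py := by
  intro lines sections section_name _hdom hpre
  unfold Spec_find_section_end_py find_section_end_py_alt
  exact pvAB_eq lines section_name sections hpre
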